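-- pv_equiv track=rewrite | github.com/M1ke6/Watermarking | Helper.py | findFiboNr
-- ===== SOURCE A (Python) =====
-- def findFiboNr(fibo, nfibo, j):     # Find the number in fibo/nfibo that is closest to the value of j
--     x = 0
--     if j < 0:
--         while True:
--             if nfibo[x] < j:
--                 return nfibo[x], x
--             else:
--                 x += 1
--     else:
--         while True:
--             if fibo[x] > j:
--                 return fibo[x-1], x-1
--             else:
--                 x += 1
-- ===== SOURCE B (Python) =====
-- def findFiboNr(fibo, nfibo, j):
--     # staged: materialize every stopping position with a comprehension, then take min()
--     if j < 0:
--         hits = [i for i, v in enumerate(nfibo) if v < j]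
--         x = min(hits)
--         return nfibo[x], x
--     else:
--         hits = [i for i, v in enumerate(fibo) if v > j]
--         x = min(hits) - 1
--         return fibo[x], x
-- ===== Notes on version B (the rewrite author's own statement) =====
-- stated objective: alternative
-- what changed: Replaces A's early-exit while-True indexed scan by two staged passes: a comprehension materializes every index whose element passes the stopping test, then min() picks the answer index and one fetch finishes; the arrays are not guaranteed sorted, so an exact binary search is impossible.
import Mathlib
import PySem

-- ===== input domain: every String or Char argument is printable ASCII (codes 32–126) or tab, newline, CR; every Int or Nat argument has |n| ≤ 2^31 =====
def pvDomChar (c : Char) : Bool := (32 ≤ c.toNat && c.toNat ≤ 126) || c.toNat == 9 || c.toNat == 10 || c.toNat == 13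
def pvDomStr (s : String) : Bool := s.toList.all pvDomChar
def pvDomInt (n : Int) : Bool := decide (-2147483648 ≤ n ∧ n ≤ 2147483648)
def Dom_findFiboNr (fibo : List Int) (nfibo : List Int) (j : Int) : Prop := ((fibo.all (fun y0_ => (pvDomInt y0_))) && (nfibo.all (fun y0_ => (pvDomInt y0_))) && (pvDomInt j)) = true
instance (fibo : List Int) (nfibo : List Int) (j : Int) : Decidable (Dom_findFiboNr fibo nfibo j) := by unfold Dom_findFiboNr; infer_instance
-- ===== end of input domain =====

-- B replaces A's early-exit indexed scan by two staged passes: collect ALL stopping positions with a comprehension, then min(); alternative decomposition, same cost.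

-- ===== PORT A =====
-- A's negative branch: while True: if nfibo[x] < j: return nfibo[x], x else x += 1
def findFiboNrNegLoop (nfibo : List Int) (j : Int) (x : Nat) : Int × Int :=
  if h : x < nfibo.length then
    if nfibo[x] < j then (nfibo[x], (x : Int))
    else findFiboNrNegLoop nfibo j (x + 1)
  else (0, 0)   -- IndexError in Python; excluded by Pre_
termination_by nfibo.length - x

-- A's nonnegative branch: while True: if fibo[x] > j: return fibo[x-1], x-1 else x += 1
def findFiboNrPosLoop (fibo : List Int) (j : Int) (x : Nat) : Int × Int :=
  if h : x < fibo.length then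
    if fibo[x] > j then ((PySem.List.pyGet? fibo ((x : Int) - 1)).getD 0, (x : Int) - 1)
    else findFiboNrPosLoop fibo j (x + 1)
  else (0, 0)   -- IndexError in Python; excluded by Pre_
termination_by fibo.length - x

def findFiboNr (fibo : List Int) (nfibo : List Int) (j : Int) : Int × Int :=
  if j < 0 then findFiboNrNegLoop nfibo j 0
  else findFiboNrPosLoop fibo j 0

-- ===== PORT B =====
-- Source B's comprehension: [i for i, v in enumerate(xs) if pred(v)]
def enumHits (xs : List Int) (pred : Int → Bool) : List Nat :=
  ((xs.zipIdx).filter (fun p => pred p.1)).map (fun p => p.2)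

-- Python's min on a list of ints; min([]) raises ValueError, excluded by Pre_
def pyMinNat (xs : List Nat) : Nat :=
  match xs with
  | [] => 0
  | h :: t => t.foldl Nat.min h

def findFiboNr_alt (fibo : List Int) (nfibo : List Int) (j : Int) : Int × Int :=
  if j < 0 then
    let x := pyMinNat (enumHits nfibo (fun v => v < j))
    ((PySem.List.pyGet? nfibo (x : Int)).getD 0, (x : Int))
  else
    let x : Int := (pyMinNat (enumHits fibo (fun v => j < v)) : Int) - 1
    ((PySem.List.pyGet? fibo x).getD 0, x)

-- ===== PRECONDITION & SPEC =====
-- Pre_ excludes exactly the inputs where A raises IndexError (and B ValueError): no element ever satisfies the stopping test.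
def Pre_findFiboNr (fibo : List Int) (nfibo : List Int) (j : Int) : Prop :=
  if j < 0 then ∃ v ∈ nfibo, v < j else ∃ v ∈ fibo, j < v
instance (fibo : List Int) (nfibo : List Int) (j : Int) : Decidable (Pre_findFiboNr fibo nfibo j) := by unfold Pre_findFiboNr; infer_instance
def pvWitness_findFiboNr : List Int × List Int × Int := ([1, 2, 5], [-1, -2, -5], 3)

def Spec_findFiboNr (fibo : List Int) (nfibo : List Int) (j : Int) (out : Int × Int) : Prop := out = findFiboNr_alt fibo nfibo j
instance (fibo : List Int) (nfibo : List Int) (j : Int) (out : Int × Int) : Decidable (Spec_findFiboNr fibo nfibo j out) := by unfold Spec_findFiboNr; infer_instance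

-- ===== CLAIM (what is proved, stated in full; the proofs are below) =====
def Claim_equal_findFiboNr : Prop := ∀ (fibo : List Int) (nfibo : List Int) (j : Int), Dom_findFiboNr fibo nfibo j → Pre_findFiboNr fibo nfibo j → Spec_findFiboNr fibo nfibo j (findFiboNr fibo nfibo j)

-- ===== LEMMAS AND PROOFS =====

-- proof-only helper: length of the longest prefix satisfying pred
def prefixLen (xs : List Int) (pred : Int → Bool) : Nat :=
  match xs with
  | [] => 0
  | v :: t => if pred v then prefixLen t pred + 1 else 0

lemma negLoop_eq (nfibo : List Int) (j : Int) :
    ∀ x : Nat, (∃ i, x ≤ i ∧ ∃ h : i < nfibo.length, nfibo[i] < j) →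
    findFiboNrNegLoop nfibo j x =
      ((PySem.List.pyGet? nfibo ((x + prefixLen (nfibo.drop x) (fun v => j ≤ v) : Nat) : Int)).getD 0,
       ((x + prefixLen (nfibo.drop x) (fun v => j ≤ v) : Nat) : Int)) := by
  intro x
  induction' hn : nfibo.length - x using Nat.strong_induction_on with n ih generalizing x
  rintro ⟨i, hxi, hi, hvi⟩
  have hx : x < nfibo.length := lt_of_le_of_lt hxi hi
  rw [findFiboNrNegLoop]
  rw [List.drop_eq_getElem_cons hx]
  by_cases hlt : nfibo[x] < j
  · have hb : decide (j ≤ nfibo[x]) = false := by simpa using not_le.mpr hlt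
    simp [hx, hlt, prefixLen, hb]
  · have hxne : x ≠ i := by rintro rfl; exact hlt hvi
    have hrec := ih (nfibo.length - (x + 1)) (by omega) (x + 1) rfl ⟨i, by omega, hi, hvi⟩
    have ht : decide (j ≤ nfibo[x]) = true := by simpa using not_lt.mp hlt
    simp only [dif_pos hx, if_neg hlt, prefixLen, ht, if_true]
    have harg : x + (prefixLen (nfibo.drop (x + 1)) (fun v => decide (j ≤ v)) + 1)
        = (x + 1) + prefixLen (nfibo.drop (x + 1)) (fun v => decide (j ≤ v)) := by omega
    rw [harg]
    exact hrec

lemma posLoop_eq (fibo : List Int) (j : Int) :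
    ∀ x : Nat, (∃ i, x ≤ i ∧ ∃ h : i < fibo.length, j < fibo[i]) →
    findFiboNrPosLoop fibo j x =
      ((PySem.List.pyGet? fibo (((x + prefixLen (fibo.drop x) (fun v => v ≤ j) : Nat) : Int) - 1)).getD 0,
       ((x + prefixLen (fibo.drop x) (fun v => v ≤ j) : Nat) : Int) - 1) := by
  intro x
  induction' hn : fibo.length - x using Nat.strong_induction_on with n ih generalizing x
  rintro ⟨i, hxi, hi, hvi⟩
  have hx : x < fibo.length := lt_of_le_of_lt hxi hi
  rw [findFiboNrPosLoop]
  rw [List.drop_eq_getElem_cons hx]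
  by_cases hgt : j < fibo[x]
  · have hb : decide (fibo[x] ≤ j) = false := by simpa using not_le.mpr hgt
    simp [hx, hgt, prefixLen, hb]
  · have hxne : x ≠ i := by rintro rfl; exact hgt hvi
    have hrec := ih (fibo.length - (x + 1)) (by omega) (x + 1) rfl ⟨i, by omega, hi, hvi⟩
    have ht : decide (fibo[x] ≤ j) = true := by simpa using not_lt.mp hgt
    simp only [dif_pos hx, if_neg hgt, prefixLen, ht, if_true]
    have harg : x + (prefixLen (fibo.drop (x + 1)) (fun v => decide (v ≤ j)) + 1)
        = (x + 1) + prefixLen (fibo.drop (x + 1)) (fun v => decide (v ≤ j)) := by omega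
    rw [harg]
    exact hrec

lemma mem_zipIdx_hits_ge (pred : Int → Bool) :
    ∀ (xs : List Int) (k y : Nat),
      y ∈ (((xs.zipIdx k).filter (fun p => pred p.1)).map (fun p => p.2)) → k ≤ y := by
  intro xs
  induction xs with
  | nil => intro k y h; simp [List.zipIdx] at h
  | cons a t ih =>
    intro k y h
    simp only [List.zipIdx_cons, List.filter_cons] at h
    by_cases hp : pred a
    · simp only [hp, if_true, List.map_cons, List.mem_cons] at h
      rcases h with rfl | h
      · exact le_refl _
      · exact le_trans (Nat.le_succ k) (ih (k + 1) y h)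
    · rw [if_neg (show ¬ ((fun p : Int × Nat => pred p.1) (a, k) = true) by simpa using hp)] at h
      exact le_trans (Nat.le_succ k) (ih (k + 1) y h)

lemma foldl_min_of_le (h : Nat) : ∀ t : List Nat, (∀ y ∈ t, h ≤ y) → t.foldl Nat.min h = h := by
  intro t
  induction t generalizing h with
  | nil => intro _; rfl
  | cons a t ih =>
    intro hall
    have : Nat.min h a = h := Nat.min_eq_left (hall a (List.mem_cons_self))
    simpa [List.foldl_cons, this] using ih h (fun y hy => hall y (List.mem_cons_of_mem _ hy))

lemma hits_head (pred : Int → Bool) :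
    ∀ (xs : List Int) (k : Nat), (∃ v ∈ xs, pred v) →
      ∃ t, (((xs.zipIdx k).filter (fun p => pred p.1)).map (fun p => p.2))
            = (k + prefixLen xs (fun v => !pred v)) :: t
        ∧ ∀ y ∈ t, k + prefixLen xs (fun v => !pred v) ≤ y := by
  intro xs
  induction xs with
  | nil => rintro k ⟨v, hv, -⟩; simp at hv
  | cons a t ih =>
    rintro k ⟨v, hv, hpv⟩
    by_cases hp : pred a
    · refine ⟨((t.zipIdx (k+1)).filter (fun p => pred p.1)).map (fun p => p.2), ?_, ?_⟩
      · simp [List.zipIdx_cons, hp, prefixLen]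
      · intro y hy
        have h1 := mem_zipIdx_hits_ge pred t (k+1) y hy
        have hpl : prefixLen (a :: t) (fun v => !pred v) = 0 := by simp [prefixLen, hp]
        rw [hpl]; omega
    · have hvt : v ∈ t := by
        rcases List.mem_cons.mp hv with rfl | h
        · exact absurd hpv hp
        · exact h
      obtain ⟨rest, heq, hge⟩ := ih (k + 1) ⟨v, hvt, hpv⟩
      refine ⟨rest, ?_, ?_⟩
      · have : prefixLen (a :: t) (fun v => !pred v) = prefixLen t (fun v => !pred v) + 1 := by
          simp [prefixLen, hp]
        rw [this]
        have harr : k + (prefixLen t (fun v => !pred v) + 1) = (k + 1) + prefixLen t (fun v => !pred v) := by omega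
        rw [harr]
        simpa [List.zipIdx_cons, List.filter_cons, hp] using heq
      · intro y hy
        have h1 : (k + 1) + prefixLen t (fun v => !pred v) ≤ y := hge y hy
        have hpl : prefixLen (a :: t) (fun v => !pred v) = prefixLen t (fun v => !pred v) + 1 := by
          simp [prefixLen, hp]
        rw [hpl]; omega

lemma pyMinNat_hits (pred : Int → Bool) (xs : List Int) (hx : ∃ v ∈ xs, pred v) :
    pyMinNat (enumHits xs pred) = prefixLen xs (fun v => !pred v) := by
  obtain ⟨t, heq, hge⟩ := hits_head pred xs 0 hx
  unfold enumHits
  have h0 : xs.zipIdx = xs.zipIdx 0 := rfl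
  rw [h0, heq]
  simpa [pyMinNat] using foldl_min_of_le _ t (by simpa using hge)

lemma prefixLen_congr (xs : List Int) (p q : Int → Bool) (h : ∀ v, p v = q v) :
    prefixLen xs p = prefixLen xs q := by
  induction xs with
  | nil => rfl
  | cons a t ih => simp [prefixLen, h a, ih]

-- ===== VERDICT (by name: the statement is the Claim_ definition above) =====
theorem findFiboNr_spec : Claim_equal_findFiboNr := by
  intro fibo nfibo j _ hpre
  unfold Spec_findFiboNr findFiboNr findFiboNr_alt
  unfold Pre_findFiboNr at hpre
  by_cases hj : j < 0
  · rw [if_pos hj, if_pos hj]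
    rw [if_pos hj] at hpre
    have hmin := pyMinNat_hits (fun v => decide (v < j)) nfibo (by simpa using hpre)
    have hcg : prefixLen nfibo (fun v => !decide (v < j)) = prefixLen nfibo (fun v => decide (j ≤ v)) := by
      apply prefixLen_congr; intro v
      by_cases h : v < j
      · simp [h, not_le.mpr h]
      · simp [h, not_lt.mp h]
    obtain ⟨v, hv, hvj⟩ := hpre
    obtain ⟨i, hi, rfl⟩ := List.mem_iff_getElem.mp hv
    have hloop := negLoop_eq nfibo j 0 ⟨i, Nat.zero_le _, hi, hvj⟩
    rw [hmin, hcg]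
    simpa using hloop
  · rw [if_neg hj, if_neg hj]
    rw [if_neg hj] at hpre
    have hmin := pyMinNat_hits (fun v => decide (j < v)) fibo (by simpa using hpre)
    have hcg : prefixLen fibo (fun v => !decide (j < v)) = prefixLen fibo (fun v => decide (v ≤ j)) := by
      apply prefixLen_congr; intro v
      by_cases h : j < v
      · simp [h, not_le.mpr h]
      · simp [h, not_lt.mp h]
    obtain ⟨v, hv, hvj⟩ := hpre
    obtain ⟨i, hi, rfl⟩ := List.mem_iff_getElem.mp hv
    have hloop := posLoop_eq fibo j 0 ⟨i, Nat.zero_le _, hi, hvj⟩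
    rw [hmin, hcg]
    simpa using hloop
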